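-- pv_equiv track=rewrite | github.com/codewitch-honey-crisis/www_fs | clasptree.py | makeSafeName
-- ===== SOURCE A (Python) =====
-- def makeSafeName(relpath, names = None):
--     if relpath is None or len(relpath) == 0:
--         return relpath
--
--     start = 0
--     while start < len(relpath) and (relpath[start] == '/' or relpath[start] == '\\' or relpath[start] == '.'):
--         start += 1
--
--     if start == len(relpath):
--         return ""
--
--     sb = ""
--     i = start
--     while i < len(relpath):
--         ch = relpath[i]
--         if ch == '_' or (ch >= '0' and ch <= '9') or (ch >= 'A' and ch <= 'Z') or (ch >= 'a' and ch <= 'z'):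
--             sb += ch
--         else:
--             if len(sb) > 0 and sb[len(sb) - 1] != '_':
--                 sb += "_"
--         i += 1
--
--     result = sb
--     if not (names is None):
--         if result in names:
--             i = 2
--             while (result + str(i)) in names:
--                 i += 1
--             result += str(i)
--         names.append(result)
--
--     return result
-- ===== SOURCE B (Python) =====
-- def makeSafeName(relpath, names = None):
--     if relpath is None or len(relpath) == 0:
--         return relpath
--
--     s = relpath.lstrip('/\\.')
--     if s == "":
--         return ""
--
--     def is_word(c):
--         return c == '_' or '0' <= c <= '9' or 'A' <= c <= 'Z' or 'a' <= c <= 'z'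
--
--     # run-based scan: copy maximal runs of word chars verbatim; for each
--     # maximal run of non-word chars emit one '_' unless output is empty or
--     # already ends with '_'
--     parts = []
--     last = ''
--     n = len(s)
--     i = 0
--     while i < n:
--         if is_word(s[i]):
--             j = i
--             while j < n and is_word(s[j]):
--                 j += 1
--             parts.append(s[i:j])
--             last = s[j - 1]
--             i = j
--         else:
--             while i < n and not is_word(s[i]):
--                 i += 1
--             if parts and last != '_':
--                 parts.append('_')
--                 last = '_'
--     result = "".join(parts)
--
--     if names is not None:
--         if result in names:
--             i = 2
--             while (result + str(i)) in names:
--                 i += 1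
--             result += str(i)
--         names.append(result)
--
--     return result
-- ===== Notes on version B (the rewrite author's own statement) =====
-- stated objective: faster
-- what changed: B strips the leading run of slashes, backslashes and dots with str.lstrip and then sanitizes run-by-run (copying each maximal word-char run verbatim as a slice and emitting at most one underscore per non-word run, joining the pieces at the end), instead of A's index-based per-character loop building the result by repeated string concatenation; the dedup tail is unchanged.
import Mathlib
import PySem

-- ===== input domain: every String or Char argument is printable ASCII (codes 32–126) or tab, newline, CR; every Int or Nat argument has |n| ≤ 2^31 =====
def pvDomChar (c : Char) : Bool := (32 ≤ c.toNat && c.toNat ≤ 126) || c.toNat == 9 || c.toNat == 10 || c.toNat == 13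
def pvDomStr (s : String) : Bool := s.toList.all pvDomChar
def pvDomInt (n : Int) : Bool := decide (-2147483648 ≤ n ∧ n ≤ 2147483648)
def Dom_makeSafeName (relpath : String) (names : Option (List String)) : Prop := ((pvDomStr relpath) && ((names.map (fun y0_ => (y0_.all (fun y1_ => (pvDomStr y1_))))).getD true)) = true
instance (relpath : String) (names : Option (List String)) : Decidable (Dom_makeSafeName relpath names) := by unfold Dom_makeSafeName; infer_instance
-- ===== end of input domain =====

-- B replaces A's per-character sanitizing loop with a run-at-a-time scan (simpler control flow);
-- equivalence is about the RETURN value — both A and B append the result to `names` in Python (same mutation).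

-- ch == '_' or '0'<=ch<='9' or 'A'<=ch<='Z' or 'a'<=ch<='z'  (shared character test)
def pvIsWord (c : Char) : Bool :=
  c = '_' || ('0' ≤ c && c ≤ '9') || ('A' ≤ c && c ≤ 'Z') || ('a' ≤ c && c ≤ 'z')

-- shared dedup tail (identical code in Source A and Source B): `while (result+str(i)) in names: i += 1`.
-- fuel = names.length+1 always suffices: the candidates result+str(2..2+len) are distinct strings.
def pvDedupFind (ns : List String) (result : String) (i : Int) : Nat → Int
  | 0 => i
  | fuel+1 =>
    if ns.contains (result ++ PySem.Int.toStr i) then pvDedupFind ns result (i+1) fuel else i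

def pvTail (result : String) (names : Option (List String)) : String :=
  match names with
  | none => result
  | some ns =>
    if ns.contains result then
      result ++ PySem.Int.toStr (pvDedupFind ns result 2 (ns.length + 1))
    else result

-- ===== PORT A =====
-- A's leading `while` skipping '/', '\', '.'
def pvStripA : List Char → List Char
  | [] => []
  | c :: rest => if c = '/' || c = '\\' || c = '.' then pvStripA rest else c :: rest

-- A's per-character loop body; sb.getLast? = sb[len(sb)-1] when sb is nonempty
def pvStepA (sb : List Char) (c : Char) : List Char :=
  if pvIsWord c then sb ++ [c]
  else if sb ≠ [] ∧ sb.getLast? ≠ some '_' then sb ++ ['_'] else sb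

def makeSafeName (relpath : String) (names : Option (List String)) : String :=
  if relpath.toList = [] then relpath
  else
    let stripped := pvStripA relpath.toList
    if stripped = [] then ""
    else pvTail (String.mk (stripped.foldl pvStepA [])) names

-- ===== PORT B =====
-- Source B: s = relpath.lstrip('/\\.')
def pvLstrip (s : List Char) : List Char := s.dropWhile (fun c => ("/\\.".toList).contains c)

-- Source B's run-scanning while loop: one recursive call per maximal run.
-- acc = "".join(parts); `parts and last != '_'` ⟺ acc ≠ [] ∧ acc.getLast? ≠ '_' (last = final char of acc).
def pvSanB (acc : List Char) : List Char → List Char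
  | [] => acc
  | c :: rest =>
    if pvIsWord c then
      pvSanB (acc ++ c :: rest.takeWhile pvIsWord) (rest.dropWhile pvIsWord)
    else
      if acc ≠ [] ∧ acc.getLast? ≠ some '_' then
        pvSanB (acc ++ ['_']) (rest.dropWhile (fun d => !pvIsWord d))
      else
        pvSanB acc (rest.dropWhile (fun d => !pvIsWord d))
termination_by l => l.length
decreasing_by
  · have := List.length_dropWhile_le pvIsWord rest; simp; omega
  · have := List.length_dropWhile_le (fun d => !pvIsWord d) rest; simp; omega
  · have := List.length_dropWhile_le (fun d => !pvIsWord d) rest; simp; omega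

def makeSafeName_alt (relpath : String) (names : Option (List String)) : String :=
  if relpath.toList = [] then relpath
  else
    let s := pvLstrip relpath.toList
    if s = [] then ""
    else pvTail (String.mk (pvSanB [] s)) names

-- ===== PRECONDITION & SPEC =====
def Spec_makeSafeName (relpath : String) (names : Option (List String)) (out : String) : Prop := out = makeSafeName_alt relpath names
instance (relpath : String) (names : Option (List String)) (out : String) : Decidable (Spec_makeSafeName relpath names out) := by unfold Spec_makeSafeName; infer_instance

-- ===== CLAIM (what is proved, stated in full; the proofs are below) =====
def Claim_equal_makeSafeName : Prop := ∀ (relpath : String) (names : Option (List String)), Dom_makeSafeName relpath names → Spec_makeSafeName relpath names (makeSafeName relpath names)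

-- ===== LEMMAS AND PROOFS =====

theorem pvStrip_eq (l : List Char) : pvStripA l = pvLstrip l := by
  have h3 : "/\\.".toList = ['/', '\\', '.'] := by decide
  unfold pvLstrip
  rw [h3]
  induction l with
  | nil => rfl
  | cons c rest ih =>
    rw [pvStripA, List.dropWhile]
    have hc : (['/', '\\', '.'].contains c) = (c = '/' || c = '\\' || c = '.') := by
      simp [Bool.or_assoc]
    rw [hc]
    by_cases h : (c = '/' || c = '\\' || c = '.') = true
    · simp only [h, if_pos]; exact ih
    · simp only [Bool.not_eq_true] at h; simp [h]

-- a run of word chars is copied verbatim by A's loop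
theorem foldl_word_run (g : List Char) : ∀ acc, (∀ x ∈ g, pvIsWord x = true) →
    List.foldl pvStepA acc g = acc ++ g := by
  induction g with
  | nil => intro acc _; simp
  | cons c g ih =>
    intro acc h
    have hc : pvIsWord c = true := h c (by simp)
    simp only [List.foldl, pvStepA, hc, if_pos]
    rw [ih (acc ++ [c]) (fun x hx => h x (by simp [hx]))]
    simp

-- a run of non-word chars is a no-op for A's loop once acc is empty or ends in '_'
theorem foldl_nonword_run (g : List Char) : ∀ acc, (∀ x ∈ g, pvIsWord x = false) →
    (acc = [] ∨ acc.getLast? = some '_') → List.foldl pvStepA acc g = acc := by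
  induction g with
  | nil => intro acc _ _; rfl
  | cons c g ih =>
    intro acc h hacc
    have hc : pvIsWord c = false := h c (by simp)
    have hstep : pvStepA acc c = acc := by
      simp only [pvStepA, hc]
      rcases hacc with h1 | h2
      · simp [h1]
      · simp [h2]
    simp only [List.foldl, hstep]
    exact ih acc (fun x hx => h x (by simp [hx])) hacc

theorem sanB_eq_aux : ∀ (n : Nat) (l : List Char), l.length ≤ n → ∀ acc,
    pvSanB acc l = List.foldl pvStepA acc l := by
  intro n
  induction n with
  | zero =>
    intro l hl acc
    have : l = [] := List.eq_nil_of_length_eq_zero (Nat.le_zero.mp hl)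
    subst this; rw [pvSanB]; simp
  | succ n ih =>
    intro l hl acc
    match l with
    | [] => rw [pvSanB]; simp
    | c :: rest =>
      by_cases hc : pvIsWord c = true
      · -- word run
        have hsplit : c :: rest = (c :: rest.takeWhile pvIsWord) ++ rest.dropWhile pvIsWord := by
          simp [List.takeWhile_append_dropWhile]
        have hrun : ∀ x ∈ c :: rest.takeWhile pvIsWord, pvIsWord x = true := by
          intro x hx
          rcases List.mem_cons.mp hx with h | h
          · subst h; exact hc
          · exact List.mem_takeWhile_imp h
        have hlen : (rest.dropWhile pvIsWord).length ≤ n := by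
          have := List.length_dropWhile_le pvIsWord rest
          simp at hl; omega
        rw [show pvSanB acc (c :: rest) =
            pvSanB (acc ++ c :: rest.takeWhile pvIsWord) (rest.dropWhile pvIsWord) by
          rw [pvSanB]; simp [hc]]
        rw [ih _ hlen]
        conv_rhs => rw [hsplit]
        rw [List.foldl_append, foldl_word_run _ _ hrun]
      · -- non-word run: A consumes c first, then the rest of the run is a no-op
        have hc' : pvIsWord c = false := by simpa using hc
        have hrun : ∀ x ∈ rest.takeWhile (fun d => !pvIsWord d), pvIsWord x = false := by
          intro x hx
          have := List.mem_takeWhile_imp hx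
          simpa using this
        have hsplit : rest = rest.takeWhile (fun d => !pvIsWord d) ++ rest.dropWhile (fun d => !pvIsWord d) := by
          simp [List.takeWhile_append_dropWhile]
        have hlen : (rest.dropWhile (fun d => !pvIsWord d)).length ≤ n := by
          have := List.length_dropWhile_le (fun d => !pvIsWord d) rest
          simp at hl; omega
        by_cases hcond : acc ≠ [] ∧ acc.getLast? ≠ some '_'
        · rw [show pvSanB acc (c :: rest) =
              pvSanB (acc ++ ['_']) (rest.dropWhile (fun d => !pvIsWord d)) by
            rw [pvSanB]; simp [hc', hcond]]
          rw [ih _ hlen]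
          have hstep : pvStepA acc c = acc ++ ['_'] := by
            simp only [pvStepA, hc']; simp [hcond]
          conv_rhs => rw [show List.foldl pvStepA acc (c :: rest) = List.foldl pvStepA (acc ++ ['_']) rest by
            simp [List.foldl, hstep]]
          conv_rhs => rw [hsplit]
          rw [List.foldl_append, foldl_nonword_run _ _ hrun (Or.inr (by simp))]
        · rw [show pvSanB acc (c :: rest) =
              pvSanB acc (rest.dropWhile (fun d => !pvIsWord d)) by
            rw [pvSanB]; simp [hc', hcond]]
          rw [ih _ hlen]
          have hacc : acc = [] ∨ acc.getLast? = some '_' := by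
            by_cases h1 : acc = []
            · exact Or.inl h1
            · right
              by_contra h2
              exact hcond ⟨h1, h2⟩
          have hstep : pvStepA acc c = acc := by
            simp only [pvStepA, hc']
            rcases hacc with h1 | h2
            · simp [h1]
            · simp [h2]
          conv_rhs => rw [show List.foldl pvStepA acc (c :: rest) = List.foldl pvStepA acc rest by
            simp [List.foldl, hstep]]
          conv_rhs => rw [hsplit]
          rw [List.foldl_append, foldl_nonword_run _ _ hrun hacc]

theorem sanB_eq (l : List Char) (acc : List Char) :
    pvSanB acc l = List.foldl pvStepA acc l :=
  sanB_eq_aux l.length l (le_refl _) acc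

-- ===== VERDICT (by name: the statement is the Claim_ definition above) =====
theorem makeSafeName_spec : Claim_equal_makeSafeName := by
  intro relpath names _
  unfold Spec_makeSafeName makeSafeName makeSafeName_alt
  by_cases h0 : relpath.toList = []
  · simp [h0]
  · simp only [h0, if_false]
    rw [pvStrip_eq, sanB_eq]
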